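-- pv_equiv track=rewrite | github.com/Ayame1006/LLMtoGraph | utils.py | clean_classify_results
-- ===== SOURCE A (Python) =====
-- def clean_classify_results (pp_response):
--     pp_clean_answer = []
--     ans_index = pp_response.find('Ans:') + 4
--     for i_idx in range(ans_index, (len(pp_response) - 1)):
--         y_temp = ""
--         if i_idx < (len(pp_response) - 2):
--             y_temp = pp_response[i_idx] + pp_response[i_idx + 1] + pp_response[i_idx + 2]
--         n_temp = pp_response[i_idx] + pp_response[i_idx + 1]
--         if y_temp == 'Yes':
--             pp_clean_answer.append(int(1))
--         elif n_temp == 'No':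
--             pp_clean_answer.append(int(0))
--
--     return pp_clean_answer
-- ===== SOURCE B (Python) =====
-- def clean_classify_results(pp_response):
--     # token scan: jump past each matched 'Yes'/'No' instead of re-checking every index
--     # (equivalent because 'Yes' and 'No' can never overlap)
--     out = []
--     i = pp_response.find('Ans:') + 4
--     while i < len(pp_response):
--         if pp_response.startswith('Yes', i):
--             out.append(1)
--             i += 3
--         elif pp_response.startswith('No', i):
--             out.append(0)
--             i += 2
--         else:
--             i += 1
--     return out
-- ===== Notes on version B (the rewrite author's own statement) =====
-- stated objective: simpler
-- what changed: A checks a 3-char and a 2-char window by explicit character concatenation at every single index; B is a token scan that uses startswith and jumps past each matched 'Yes'/'No' (valid because the two tokens can never overlap), keeping A's find('Ans:')+4 fall-through when 'Ans:' is absent.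
import Mathlib
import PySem

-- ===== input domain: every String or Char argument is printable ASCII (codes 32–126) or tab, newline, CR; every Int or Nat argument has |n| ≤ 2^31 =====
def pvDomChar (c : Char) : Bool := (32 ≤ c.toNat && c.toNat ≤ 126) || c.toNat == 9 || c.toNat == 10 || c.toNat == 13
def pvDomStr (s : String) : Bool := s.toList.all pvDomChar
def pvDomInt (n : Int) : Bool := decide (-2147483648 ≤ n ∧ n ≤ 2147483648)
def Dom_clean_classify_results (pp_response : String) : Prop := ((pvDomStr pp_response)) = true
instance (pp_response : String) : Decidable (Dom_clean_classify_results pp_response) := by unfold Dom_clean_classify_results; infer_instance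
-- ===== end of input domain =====

-- B replaces A's per-index 3-char/2-char window comparisons by a token scan that jumps
-- past each matched 'Yes'/'No' (objective: simpler; equal output since the tokens never overlap).

-- ===== PORT A =====
-- pp_response[i] as a one-char List Char; the default [] is never reached on the loop's
-- indices (always in range), so this is exact where the Python indexing succeeds.
def pvCharAt (cs : List Char) (i : Int) : List Char :=
  match PySem.List.pyGet? cs i with
  | some c => [c]
  | none => []

def clean_classify_results (pp_response : String) : List Int :=
  let cs := pp_response.toList
  let n : Int := cs.length
  let ans_index : Int := PySem.Str.find pp_response "Ans:" + 4
  (PySem.List.pyRange ans_index (n - 1) 1).foldl (fun acc i =>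
    let y_temp : List Char :=
      if i < n - 2 then pvCharAt cs i ++ pvCharAt cs (i + 1) ++ pvCharAt cs (i + 2) else []
    let n_temp : List Char := pvCharAt cs i ++ pvCharAt cs (i + 1)
    if y_temp = ['Y', 'e', 's'] then acc ++ [(1 : Int)]
    else if n_temp = ['N', 'o'] then acc ++ [(0 : Int)]
    else acc) []

-- ===== PORT B =====
-- B's while loop with startswith, as structural recursion on the remaining characters.
def pvScan : List Char → List Int
  | [] => []
  | c :: rest =>
    if c = 'Y' ∧ rest.take 2 = ['e', 's'] then 1 :: pvScan (rest.drop 2)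
    else if c = 'N' ∧ rest.take 1 = ['o'] then 0 :: pvScan (rest.drop 1)
    else pvScan rest
termination_by l => l.length
decreasing_by all_goals simp

def clean_classify_results_alt (pp_response : String) : List Int :=
  pvScan (pp_response.toList.drop (PySem.Str.find pp_response "Ans:" + 4).toNat)

-- ===== PRECONDITION & SPEC =====
def Spec_clean_classify_results (pp_response : String) (out : List Int) : Prop := out = clean_classify_results_alt pp_response
instance (pp_response : String) (out : List Int) : Decidable (Spec_clean_classify_results pp_response out) := by unfold Spec_clean_classify_results; infer_instance

-- ===== CLAIM (what is proved, stated in full; the proofs are below) =====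
def Claim_equal_clean_classify_results : Prop := ∀ (pp_response : String), Dom_clean_classify_results pp_response → Spec_clean_classify_results pp_response (clean_classify_results pp_response)

-- ===== LEMMAS AND PROOFS =====

-- A's per-index scan, phrased on the suffix of the string from the current index.
def pvScanA : List Int → List Char → List Int
  | acc, c1 :: c2 :: rest =>
    pvScanA
      (if (if rest ≠ [] then c1 :: c2 :: rest.take 1 else []) = ['Y', 'e', 's'] then acc ++ [1]
       else if [c1, c2] = ['N', 'o'] then acc ++ [0] else acc)
      (c2 :: rest)
  | acc, _ => acc

lemma pvScanA_eq (l : List Char) : ∀ acc : List Int, pvScanA acc l = acc ++ pvScanA [] l := by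
  induction l with
  | nil => intro acc; simp [pvScanA]
  | cons c1 tl ih =>
    intro acc
    cases tl with
    | nil => simp [pvScanA]
    | cons c2 rest =>
      simp only [pvScanA]
      split_ifs <;> simp only [ih (acc ++ [1]), ih (acc ++ [0]), ih acc, ih ([] ++ [1]), ih ([] ++ [0])] <;> simp

-- a character that starts neither token is skipped by the token scan too
lemma pvScanA_skip (c : Char) (l : List Char) (hY : c ≠ 'Y') (hN : c ≠ 'N') :
    pvScanA [] (c :: l) = pvScanA [] l := by
  cases l with
  | nil => simp [pvScanA]
  | cons c2 r =>
    simp only [pvScanA]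
    have h1 : (if r = [] then [] else c :: c2 :: r.take 1) ≠ ['Y', 'e', 's'] := by
      split_ifs <;> simp [hY]
    have h2 : [c, c2] ≠ ['N', 'o'] := by simp [hN]
    simp [h1, h2]

-- the foldl over the index range computes pvScanA on the dropped suffix
lemma pvCharAt_eq (cs : List Char) (i : Int) (j : Nat) (hij : i = (j : Int)) (hj : j < cs.length) :
    pvCharAt cs i = [cs[j]] := by
  subst hij
  simp [pvCharAt, hj]

lemma pvFoldl_aux (cs : List Char) (m : Nat) :
    ∀ (k : Nat) (acc : List Int), cs.length ≤ k + m →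
    (PySem.List.pyRange (k : Int) ((cs.length : Int) - 1) 1).foldl (fun acc i =>
      if (if i < (cs.length : Int) - 2 then pvCharAt cs i ++ pvCharAt cs (i + 1) ++ pvCharAt cs (i + 2) else []) = ['Y', 'e', 's'] then acc ++ [(1 : Int)]
      else if pvCharAt cs i ++ pvCharAt cs (i + 1) = ['N', 'o'] then acc ++ [(0 : Int)]
      else acc) acc = pvScanA acc (cs.drop k) := by
  induction m with
  | zero =>
    intro k acc h
    rw [PySem.List.pyRange_one_eq_nil (by omega)]
    rw [List.drop_eq_nil_of_le (by omega)]
    simp [pvScanA]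
  | succ m ih =>
    intro k acc h
    by_cases hk : k + 1 < cs.length
    · have hk0 : k < cs.length := by omega
      rw [PySem.List.pyRange_one_cons (by omega)]
      simp only [List.foldl_cons]
      have e0 : pvCharAt cs ((k : Int)) = [cs[k]] := pvCharAt_eq cs _ k rfl hk0
      have e1 : pvCharAt cs ((k : Int) + 1) = [cs[k + 1]] := pvCharAt_eq cs _ (k + 1) (by push_cast; ring) hk
      have hdk : cs.drop k = cs[k] :: cs.drop (k + 1) := List.drop_eq_getElem_cons hk0
      have hdk1 : cs.drop (k + 1) = cs[k + 1] :: cs.drop (k + 2) := List.drop_eq_getElem_cons hk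
      rw [hdk, hdk1]
      simp only [pvScanA, ← hdk1]
      rw [e0, e1]
      have hc1 : ((k : Int) + 1) = ((k + 1 : Nat) : Int) := by push_cast; ring
      rw [hc1, ih (k + 1) _ (by omega)]
      congr 1
      by_cases hg : k + 2 < cs.length
      · have e2 : pvCharAt cs ((k : Int) + 2) = [cs[k + 2]] := pvCharAt_eq cs _ (k + 2) (by push_cast; ring) hg
        have hgI : (k : Int) < (cs.length : Int) - 2 := by omega
        have hne : cs.drop (k + 2) ≠ [] := by
          simp [List.drop_eq_nil_iff]; omega
        have ht : (cs.drop (k + 2)).take 1 = [cs[k + 2]] := by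
          rw [List.drop_eq_getElem_cons hg]; rfl
        simp only [e2, if_pos hgI, if_pos hne, ht]
        simp
      · have hgI : ¬ ((k : Int) < (cs.length : Int) - 2) := by omega
        have hnil : cs.drop (k + 2) = [] := by
          simp [List.drop_eq_nil_iff]; omega
        simp only [if_neg hgI, hnil]
        simp
    · rw [PySem.List.pyRange_one_eq_nil (by omega)]
      simp only [List.foldl_nil]
      cases hd : cs.drop k with
      | nil => simp [pvScanA]
      | cons c tl =>
        have htl : tl = [] := by
          have hlen : (cs.drop k).length = tl.length + 1 := by rw [hd]; simp
          simp only [List.length_drop] at hlen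
          exact List.eq_nil_of_length_eq_zero (by omega)
        subst htl
        simp [pvScanA]

lemma pvFoldl_eq_scanA (cs : List Char) (k : Nat) (acc : List Int) :
    (PySem.List.pyRange (k : Int) ((cs.length : Int) - 1) 1).foldl (fun acc i =>
      let y_temp : List Char :=
        if i < (cs.length : Int) - 2 then pvCharAt cs i ++ pvCharAt cs (i + 1) ++ pvCharAt cs (i + 2) else []
      let n_temp : List Char := pvCharAt cs i ++ pvCharAt cs (i + 1)
      if y_temp = ['Y', 'e', 's'] then acc ++ [(1 : Int)]
      else if n_temp = ['N', 'o'] then acc ++ [(0 : Int)]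
      else acc) acc = pvScanA acc (cs.drop k) :=
  pvFoldl_aux cs cs.length k acc (by omega)

-- the non-overlapping token scan agrees with the per-index scan
lemma pvScanA_eq_pvScan_aux (m : Nat) : ∀ l : List Char, l.length ≤ m → pvScanA [] l = pvScan l := by
  induction m with
  | zero =>
    intro l hl
    have : l = [] := List.eq_nil_of_length_eq_zero (by omega)
    subst this; simp [pvScanA, pvScan]
  | succ m ih =>
    intro l hl
    match l with
    | [] => simp [pvScanA, pvScan]
    | [c] =>
      simp only [pvScanA, pvScan]
      split_ifs with h1 h2
      · simp at h1
      · simp at h2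
      · rfl
    | c1 :: c2 :: rest =>
      simp only [pvScanA]
      rw [pvScanA_eq]
      by_cases hYes : c1 = 'Y' ∧ c2 = 'e' ∧ rest.take 1 = ['s']
      · obtain ⟨h1, h2, h3⟩ := hYes
        obtain ⟨rest', hr⟩ : ∃ rest', rest = 's' :: rest' := by
          cases rest with
          | nil => simp at h3
          | cons a b => simp at h3; exact ⟨b, by rw [h3]⟩
        subst h1 h2 hr
        have hA : (if ('s'::rest' : List Char) ≠ [] then 'Y' :: 'e' :: ('s'::rest').take 1 else []) = ['Y','e','s'] := by simp
        rw [if_pos hA]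
        have hB : ('Y' : Char) = 'Y' ∧ (('e'::'s'::rest' : List Char)).take 2 = ['e','s'] := by simp
        rw [pvScan, if_pos hB]
        rw [pvScanA_skip 'e' _ (by decide) (by decide), pvScanA_skip 's' _ (by decide) (by decide)]
        rw [ih rest' (by simp at hl; omega)]
        simp
      · by_cases hNo : c1 = 'N' ∧ c2 = 'o'
        · obtain ⟨h1, h2⟩ := hNo
          subst h1 h2
          have hA : (if rest ≠ [] then ('N':Char) :: 'o' :: rest.take 1 else []) ≠ ['Y','e','s'] := by
            split_ifs <;> simp
          rw [if_neg hA, if_pos (show (['N','o'] : List Char) = ['N','o'] from rfl)]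
          have hB : ¬(('N' : Char) = 'Y' ∧ (('o'::rest : List Char)).take 2 = ['e','s']) := by simp
          have hC : ('N' : Char) = 'N' ∧ (('o'::rest : List Char)).take 1 = ['o'] := by simp
          rw [pvScan, if_neg hB, if_pos hC]
          rw [pvScanA_skip 'o' _ (by decide) (by decide)]
          rw [ih rest (by simp at hl; omega)]
          simp
        · have hA : (if rest ≠ [] then c1 :: c2 :: rest.take 1 else []) ≠ ['Y','e','s'] := by
            split_ifs with h
            · intro he
              simp at he
              exact hYes ⟨he.1, he.2.1, he.2.2⟩
            · simp
          have hB : [c1, c2] ≠ ['N','o'] := by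
            intro he; simp at he; exact hNo ⟨he.1, he.2⟩
          rw [if_neg hA, if_neg hB]
          have hC : ¬(c1 = 'Y' ∧ ((c2::rest : List Char)).take 2 = ['e','s']) := by
            intro he
            cases rest with
            | nil => simp at he
            | cons a b =>
              simp at he
              exact hYes ⟨he.1, he.2.1, by simp [he.2.2]⟩
          have hD : ¬(c1 = 'N' ∧ ((c2::rest : List Char)).take 1 = ['o']) := by
            intro he; simp at he; exact hNo ⟨he.1, he.2⟩
          rw [pvScan, if_neg hC, if_neg hD]
          simp only [List.nil_append]
          exact ih (c2 :: rest) (by simp at hl ⊢; omega)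

lemma pvScanA_eq_pvScan (l : List Char) : pvScanA [] l = pvScan l :=
  pvScanA_eq_pvScan_aux l.length l le_rfl

-- ===== VERDICT (by name: the statement is the Claim_ definition above) =====
theorem clean_classify_results_spec : Claim_equal_clean_classify_results := by
  intro s _hdom
  unfold Spec_clean_classify_results clean_classify_results clean_classify_results_alt
  have h3 : (-1 : Int) ≤ PySem.Str.find s "Ans:" := by
    simp only [PySem.Str.find_eq]
    have h1 := PySem.Chars.find_nonneg_iff s.toList "Ans:".toList
    have h2 := PySem.Chars.find_eq_neg_one_iff s.toList "Ans:".toList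
    by_cases hc : "Ans:".toList <:+: s.toList
    · have := h1.mpr hc; omega
    · have := h2.mpr hc; omega
  have hcast : PySem.Str.find s "Ans:" + 4 = (((PySem.Str.find s "Ans:" + 4).toNat : Nat) : Int) := by omega
  rw [hcast, pvFoldl_eq_scanA, pvScanA_eq_pvScan]
  congr 2
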